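-- pv_equiv track=rewrite | github.com/Robertsong111/Nonogram_Project | py/论文时间回溯判断.py | match_col_prefix
-- ===== SOURCE A (Python) =====
-- def match_col_prefix(col_vals, constraint):
--     segments = []
--     cnt = 0
--     for val in col_vals:
--         if val == '#':
--             cnt += 1
--         elif cnt > 0:
--             segments.append(cnt)
--             cnt = 0
--     if cnt > 0:
--         segments.append(cnt)
--     if len(segments) > len(constraint):
--         return False
--     for i in range(len(segments)):
--         if segments[i] > constraint[i]:
--             return False
--     return True
-- ===== SOURCE B (Python) =====
-- def match_col_prefix(col_vals, constraint):
--     cnt = 0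
--     seg_idx = 0
--     for val in col_vals:
--         if val == '#':
--             cnt += 1
--         elif cnt > 0:
--             if seg_idx >= len(constraint) or cnt > constraint[seg_idx]:
--                 return False
--             seg_idx += 1
--             cnt = 0
--     if cnt > 0:
--         if seg_idx >= len(constraint) or cnt > constraint[seg_idx]:
--             return False
--     return True
-- ===== Notes on version B (the rewrite author's own statement) =====
-- stated objective: simpler
-- what changed: B is a single pass that checks each run against the current constraint entry as soon as the run ends, with early return, instead of first building a segments list and then running a second indexed checking loop.
import Mathlib
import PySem

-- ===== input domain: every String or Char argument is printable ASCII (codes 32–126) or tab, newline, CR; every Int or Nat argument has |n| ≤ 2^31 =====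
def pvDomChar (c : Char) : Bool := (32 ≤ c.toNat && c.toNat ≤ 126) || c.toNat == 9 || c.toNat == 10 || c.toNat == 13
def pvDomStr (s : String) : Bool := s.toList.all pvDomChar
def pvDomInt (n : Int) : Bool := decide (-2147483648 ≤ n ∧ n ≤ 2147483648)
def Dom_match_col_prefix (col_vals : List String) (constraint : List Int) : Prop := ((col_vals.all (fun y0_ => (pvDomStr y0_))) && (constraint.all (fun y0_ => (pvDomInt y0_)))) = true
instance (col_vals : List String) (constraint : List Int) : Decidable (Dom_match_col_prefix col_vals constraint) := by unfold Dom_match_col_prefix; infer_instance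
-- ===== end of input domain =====

-- B replaces A's build-segments-then-check structure by a single pass that validates each
-- run of '#' against the next constraint entry the moment the run ends (objective: simpler).

-- ===== PORT A =====
-- the second loop: for i in range(len(segments)): if segments[i] > constraint[i]: return False
-- (run after the length check, so ported as a paired traversal; the segments-longer case is the length check's)
def aCheckLoop : List Int → List Int → Bool
  | [], _ => true
  | s :: ss, c :: cs => if s > c then false else aCheckLoop ss cs
  | _ :: _, [] => false

def match_col_prefix (col_vals : List String) (constraint : List Int) : Bool :=
  let st : List Int × Int := col_vals.foldl
    (fun acc val =>
      if val == "#" then (acc.1, acc.2 + 1)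
      else if acc.2 > 0 then (acc.1 ++ [acc.2], 0)
      else acc) ([], 0)
  let segments := if st.2 > 0 then st.1 ++ [st.2] else st.1
  if segments.length > constraint.length then false
  else aCheckLoop segments constraint

-- ===== PORT B =====
-- single pass; the advancing seg_idx into constraint is rendered as consuming the list head-wise
def bLoop : List String → Int → List Int → Bool
  | [], cnt, cs =>
      if cnt > 0 then
        match cs with
        | [] => false
        | c :: _ => if cnt > c then false else true
      else true
  | v :: vs, cnt, cs =>
      if v == "#" then bLoop vs (cnt + 1) cs
      else if cnt > 0 then
        match cs with
        | [] => false
        | c :: cs' => if cnt > c then false else bLoop vs 0 cs'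
      else bLoop vs cnt cs

def match_col_prefix_alt (col_vals : List String) (constraint : List Int) : Bool :=
  bLoop col_vals 0 constraint

-- ===== PRECONDITION & SPEC =====
def Spec_match_col_prefix (col_vals : List String) (constraint : List Int) (out : Bool) : Prop := out = match_col_prefix_alt col_vals constraint
instance (col_vals : List String) (constraint : List Int) (out : Bool) : Decidable (Spec_match_col_prefix col_vals constraint out) := by unfold Spec_match_col_prefix; infer_instance

-- ===== CLAIM (what is proved, stated in full; the proofs are below) =====
def Claim_equal_match_col_prefix : Prop := ∀ (col_vals : List String) (constraint : List Int), Dom_match_col_prefix col_vals constraint → Spec_match_col_prefix col_vals constraint (match_col_prefix col_vals constraint)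

-- ===== LEMMAS AND PROOFS =====

-- segments that the rest of A's first loop produces, continuing from current run length cnt
def segsFrom : List String → Int → List Int
  | [], cnt => if cnt > 0 then [cnt] else []
  | v :: vs, cnt =>
      if v == "#" then segsFrom vs (cnt + 1)
      else if cnt > 0 then cnt :: segsFrom vs 0
      else segsFrom vs cnt

-- A's final decision as a function of the segments list
def aCheck (segs cs : List Int) : Bool :=
  if segs.length > cs.length then false else aCheckLoop segs cs

theorem fold_segs (col : List String) (segs : List Int) (cnt : Int) :
    (let st := col.foldl
        (fun (acc : List Int × Int) val =>
          if val == "#" then (acc.1, acc.2 + 1)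
          else if acc.2 > 0 then (acc.1 ++ [acc.2], 0)
          else acc) (segs, cnt)
     if st.2 > 0 then st.1 ++ [st.2] else st.1) = segs ++ segsFrom col cnt := by
  induction col generalizing segs cnt with
  | nil => simp [segsFrom]; split <;> simp
  | cons v vs ih =>
      simp only [List.foldl_cons, segsFrom]
      by_cases h : v == "#"
      · simpa [h] using ih segs (cnt + 1)
      · simp only [h, if_false, Bool.false_eq_true]
        by_cases hc : cnt > 0
        · simpa [hc] using ih (segs ++ [cnt]) 0
        · simpa [hc] using ih segs cnt

theorem aCheck_cons (s c : Int) (ss cs : List Int) (h : ¬ s > c) :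
    aCheck (s :: ss) (c :: cs) = aCheck ss cs := by
  simp [aCheck, aCheckLoop, h]

theorem bLoop_eq (col : List String) (cnt : Int) (cs : List Int) :
    bLoop col cnt cs = aCheck (segsFrom col cnt) cs := by
  induction col generalizing cnt cs with
  | nil =>
      by_cases hc : cnt > 0
      · cases cs with
        | nil => simp [bLoop, segsFrom, aCheck, hc]
        | cons c cs' =>
            by_cases hs : cnt > c <;>
              simp [bLoop, segsFrom, aCheck, aCheckLoop, hc, hs]
      · simp [bLoop, segsFrom, aCheck, aCheckLoop, hc]
  | cons v vs ih =>
      simp only [bLoop, segsFrom]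
      by_cases h : v == "#"
      · simp [h, ih]
      · simp only [h, if_false, Bool.false_eq_true]
        by_cases hc : cnt > 0
        · cases cs with
          | nil => simp [hc, aCheck]
          | cons c cs' =>
              by_cases hs : cnt > c
              · simp [hc, hs, aCheck, aCheckLoop]
              · simp [hc, hs, ih, aCheck_cons cnt c _ cs' hs]
        · simp [hc, ih]

-- ===== VERDICT (by name: the statement is the Claim_ definition above) =====
theorem match_col_prefix_spec : Claim_equal_match_col_prefix := by
  intro col cs _
  unfold Spec_match_col_prefix match_col_prefix match_col_prefix_alt
  rw [bLoop_eq]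
  have h := fold_segs col [] 0
  simp only [List.nil_append] at h
  simp only [h, aCheck]
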